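-- pv_equiv track=rewrite | github.com/dyollb/modernize_cpp | replace_scripts/replace_assign_list_of.py | split_balanced
-- ===== SOURCE A (Python) =====
-- def split_balanced(txt, initial_count):
--     """ find first split where all opened brackets are closed """
--     count = initial_count
--     for idx, i in enumerate(txt):
--         if i == "(":
--             count += 1
--         elif i == ")":
--             count -= 1
--         if count == 0:
--             return txt[0:idx], txt[(idx + 1) :]
--     return txt, ""
-- ===== SOURCE B (Python) =====
-- def split_balanced(txt, initial_count):
--     """find first split where all opened brackets are closed"""
--     deltas = [(c == "(") - (c == ")") for c in txt]
--     counts = []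
--     total = initial_count
--     for d in deltas:
--         total += d
--         counts.append(total)
--     try:
--         idx = counts.index(0)
--     except ValueError:
--         return txt, ""
--     return txt[:idx], txt[idx + 1:]
-- ===== Notes on version B (the rewrite author's own statement) =====
-- stated objective: alternative
-- what changed: Replaces the single enumerate loop with early return by a three-stage pipeline: map characters to bracket deltas, build the inclusive running-count list, then locate the first zero with list.index and slice once at the end.
import Mathlib
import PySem

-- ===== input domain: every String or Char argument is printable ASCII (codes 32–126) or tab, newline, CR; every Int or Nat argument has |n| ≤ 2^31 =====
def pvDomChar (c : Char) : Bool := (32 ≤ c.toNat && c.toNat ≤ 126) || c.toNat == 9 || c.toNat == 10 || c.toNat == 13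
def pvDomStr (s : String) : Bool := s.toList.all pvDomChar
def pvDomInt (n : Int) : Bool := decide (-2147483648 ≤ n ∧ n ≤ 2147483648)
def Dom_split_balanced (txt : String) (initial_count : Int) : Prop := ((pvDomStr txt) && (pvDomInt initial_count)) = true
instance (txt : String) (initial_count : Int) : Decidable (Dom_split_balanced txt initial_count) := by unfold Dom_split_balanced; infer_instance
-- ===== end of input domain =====

-- B restates A's early-return bracket scan as a pipeline (deltas, running counts, first zero, one final slice); alternative decomposition, same cost.

-- ===== PORT A =====
-- the for-loop with early return: recursion over enumerate(txt)
def splitBalancedLoop (txt : String) : List (Int × Char) → Int → String × String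
  | [], _ => (txt, "")
  | (idx, i) :: rest, count =>
    let count' := if i = '(' then count + 1 else if i = ')' then count - 1 else count
    if count' = 0 then
      (PySem.Str.slice txt (some 0) (some idx), PySem.Str.slice txt (some (idx + 1)) none)
    else
      splitBalancedLoop txt rest count'

def split_balanced (txt : String) (initial_count : Int) : String × String :=
  splitBalancedLoop txt (PySem.List.enumerate txt.toList 0) initial_count

-- ===== PORT B =====
-- counts is built by the Source B for-loop (append to a list), folded over deltas
def split_balanced_alt (txt : String) (initial_count : Int) : String × String :=
  let deltas : List Int := txt.toList.map (fun c =>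
    (if c = '(' then (1 : Int) else 0) - (if c = ')' then (1 : Int) else 0))
  let counts : List Int :=
    (deltas.foldl (fun (acc : List Int × Int) d =>
      (acc.1 ++ [acc.2 + d], acc.2 + d)) ([], initial_count)).1
  match PySem.List.index? counts 0 with
  | none => (txt, "")
  | some idx => (PySem.Str.slice txt none (some (idx : Int)),
                 PySem.Str.slice txt (some ((idx : Int) + 1)) none)

-- ===== PRECONDITION & SPEC =====
def Spec_split_balanced (txt : String) (initial_count : Int) (out : String × String) : Prop := out = split_balanced_alt txt initial_count
instance (txt : String) (initial_count : Int) (out : String × String) : Decidable (Spec_split_balanced txt initial_count out) := by unfold Spec_split_balanced; infer_instance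

-- ===== CLAIM (what is proved, stated in full; the proofs are below) =====
def Claim_equal_split_balanced : Prop := ∀ (txt : String) (initial_count : Int), Dom_split_balanced txt initial_count → Spec_split_balanced txt initial_count (split_balanced txt initial_count)

-- ===== LEMMAS AND PROOFS =====

-- first index (if any) at which the running count hits zero
def firstZero : List Char → Int → Option Nat
  | [], _ => none
  | c :: cs, count =>
    let count' := if c = '(' then count + 1 else if c = ')' then count - 1 else count
    if count' = 0 then some 0 else (firstZero cs count').map (· + 1)

-- the running-count list B builds
def runCounts : List Int → Int → List Int
  | [], _ => []
  | d :: ds, c => (c + d) :: runCounts ds (c + d)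

theorem foldl_runCounts (ds : List Int) (l : List Int) (c : Int) :
    (ds.foldl (fun (acc : List Int × Int) d => (acc.1 ++ [acc.2 + d], acc.2 + d)) (l, c)).1
      = l ++ runCounts ds c := by
  induction ds generalizing l c with
  | nil => simp [runCounts]
  | cons d ds ih => simp [runCounts, ih]

theorem index?_runCounts (cs : List Char) (c : Int) :
    PySem.List.index? (runCounts (cs.map (fun ch =>
        (if ch = '(' then (1 : Int) else 0) - (if ch = ')' then (1 : Int) else 0))) c) 0
      = firstZero cs c := by
  induction cs generalizing c with
  | nil => simp [runCounts, firstZero, PySem.List.index?]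
  | cons ch cs ih =>
    have hd : c + ((if ch = '(' then (1 : Int) else 0) - (if ch = ')' then (1 : Int) else 0))
        = (if ch = '(' then c + 1 else if ch = ')' then c - 1 else c) := by
      by_cases h1 : ch = '(' <;> by_cases h2 : ch = ')' <;> simp [h1, h2] <;> omega
    simp only [List.map_cons, runCounts, firstZero, hd]
    by_cases hz : (if ch = '(' then c + 1 else if ch = ')' then c - 1 else c) = 0
    · rw [hz, if_pos rfl, PySem.List.index?_cons_self]
    · rw [if_neg hz, PySem.List.index?_cons_of_ne _ hz, ih]

theorem loop_eq_firstZero (txt : String) (cs : List Char) (s : Int) (c : Int) :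
    splitBalancedLoop txt (PySem.List.enumerate cs s) c
      = match firstZero cs c with
        | none => (txt, "")
        | some j => (PySem.Str.slice txt (some 0) (some (s + (j : Int))),
                     PySem.Str.slice txt (some (s + (j : Int) + 1)) none) := by
  induction cs generalizing s c with
  | nil => simp [PySem.List.enumerate_nil, splitBalancedLoop, firstZero]
  | cons ch cs ih =>
    rw [PySem.List.enumerate_cons]
    simp only [splitBalancedLoop, firstZero]
    by_cases hz : (if ch = '(' then c + 1 else if ch = ')' then c - 1 else c) = 0
    · simp [hz]
    · rw [if_neg hz, if_neg hz, ih (s + 1)]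
      cases firstZero cs (if ch = '(' then c + 1 else if ch = ')' then c - 1 else c) with
      | none => simp
      | some j =>
        simp only [Option.map_some]
        have h1 : s + 1 + (j : Int) = s + (((j + 1 : Nat) : Int)) := by push_cast; ring
        have h2 : s + 1 + (j : Int) + 1 = s + (((j + 1 : Nat) : Int)) + 1 := by push_cast; ring
        rw [h1]

-- slicing from 0 is slicing from the start (String level)
theorem str_slice_zero (txt : String) (b : Int) :
    PySem.Str.slice txt (some 0) (some b) = PySem.Str.slice txt none (some b) := by
  simp [PySem.Str.slice]

-- ===== VERDICT (by name: the statement is the Claim_ definition above) =====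
theorem split_balanced_spec : Claim_equal_split_balanced := by
  intro txt ic _
  show split_balanced txt ic = split_balanced_alt txt ic
  unfold split_balanced split_balanced_alt
  simp only [foldl_runCounts, List.nil_append, index?_runCounts,
    loop_eq_firstZero txt txt.toList 0 ic, zero_add]
  cases firstZero txt.toList ic with
  | none => simp
  | some j => simp [str_slice_zero]
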